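-- pv_equiv track=rewrite | github.com/MrBrantCode/unitest_baseline | mut_generate/mist_train_taco/taco_4654/solution.py | calculate_max_possible_value
-- ===== SOURCE A (Python) =====
-- def calculate_max_possible_value(arr, MOD=1000000007):
--     """
--     Calculate the maximum possible value of C for the given array arr.
--
--     Parameters:
--     arr (list of int): The array of numbers.
--     MOD (int): The modulus value to be used for large numbers (default is 1000000007).
--
--     Returns:
--     int: The maximum possible value of C modulo MOD.
--     """
--     # Sort the array in descending order
--     s = sorted(arr, reverse=True)
--
--     # Calculate the first part of the sum
--     summ = 0
--     n = len(s)
--     for i in range(n // 2):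
--         summ = (summ + s[i]) % MOD
--     for i in range(n // 2, n):
--         summ = (summ - s[i]) % MOD
--
--     # If the length of the array is odd, handle the middle element
--     if n % 2 != 0:
--         summ = (summ + s[n // 2]) % MOD
--         summ = (summ + s[n // 2]) % MOD
--
--     # Calculate the second part of the sum
--     summ2 = 0
--     for e in s:
--         summ2 = (summ2 + abs(e)) % MOD
--
--     # Return the final result
--     return (summ2 * summ) % MOD
-- ===== SOURCE B (Python) =====
-- def _sum_smallest(xs, k):
--     """Sum of the k smallest elements of xs, by quickselect-style partitioning."""
--     if k == 0:
--         return 0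
--     p = xs[len(xs) // 2]
--     less = [x for x in xs if x < p]
--     greater = [x for x in xs if x > p]
--     n_eq = len(xs) - len(less) - len(greater)
--     if k <= len(less):
--         return _sum_smallest(less, k)
--     if k <= len(less) + n_eq:
--         return sum(less) + p * (k - len(less))
--     return sum(less) + p * n_eq + _sum_smallest(greater, k - len(less) - n_eq)
--
--
-- def calculate_max_possible_value(arr, MOD=1000000007):
--     total = 0
--     total_abs = 0
--     for e in arr:
--         total += e
--         total_abs += abs(e)
--     low = _sum_smallest(arr, len(arr) // 2)
--     return (total_abs % MOD) * ((total - 2 * low) % MOD) % MOD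
-- ===== Notes on version B (the rewrite author's own statement) =====
-- stated objective: faster
-- what changed: B replaces A's full descending sort and three stepwise-mod loops by one accumulation pass (total sum and absolute sum) plus a quickselect-style recursive partition that computes the sum of the floor(n/2) smallest elements, taking the modulus only at the end.
import Mathlib
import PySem

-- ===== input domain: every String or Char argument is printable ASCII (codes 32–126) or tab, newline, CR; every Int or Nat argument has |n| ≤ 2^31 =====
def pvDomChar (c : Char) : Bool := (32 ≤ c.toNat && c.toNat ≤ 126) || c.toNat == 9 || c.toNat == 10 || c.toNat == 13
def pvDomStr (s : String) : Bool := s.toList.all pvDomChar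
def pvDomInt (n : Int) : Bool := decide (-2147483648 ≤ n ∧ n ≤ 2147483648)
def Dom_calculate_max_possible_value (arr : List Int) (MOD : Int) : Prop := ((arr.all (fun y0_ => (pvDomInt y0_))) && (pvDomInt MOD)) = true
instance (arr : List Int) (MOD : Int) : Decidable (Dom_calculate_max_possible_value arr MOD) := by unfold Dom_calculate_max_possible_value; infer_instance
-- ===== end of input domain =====

-- B replaces A's full descending sort by a quickselect-style partition: the answer only needs
-- the sum of the ⌊n/2⌋ smallest elements, the total sum and the sum of absolute values.

-- ===== PORT A =====
def calculate_max_possible_value (arr : List Int) (MOD : Int) : Int :=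
  let s := PySem.List.sorted arr (fun x => x) true
  let n : Int := s.length
  let summ : Int := (PySem.List.pyRange 0 (PySem.Int.floordiv n 2) 1).foldl
      (fun summ i => PySem.Int.mod (summ + PySem.List.pyGetD s i 0) MOD) 0
  let summ := (PySem.List.pyRange (PySem.Int.floordiv n 2) n 1).foldl
      (fun summ i => PySem.Int.mod (summ - PySem.List.pyGetD s i 0) MOD) summ
  let summ :=
    if PySem.Int.mod n 2 ≠ 0 then
      PySem.Int.mod (PySem.Int.mod (summ + PySem.List.pyGetD s (PySem.Int.floordiv n 2) 0) MOD
        + PySem.List.pyGetD s (PySem.Int.floordiv n 2) 0) MOD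
    else summ
  let summ2 := s.foldl (fun acc e => PySem.Int.mod (acc + |e|) MOD) 0
  PySem.Int.mod (summ2 * summ) MOD

-- ===== PORT B =====
-- termination helper for the quickselect recursion (cited by decreasing_by)
theorem pv_filter_length_lt (xs : List Int) (f : Int → Bool) (p : Int)
    (hp : p ∈ xs) (hf : f p = false) : (xs.filter f).length < xs.length := by
  induction xs with
  | nil => cases hp
  | cons y ys ih =>
    rcases List.mem_cons.mp hp with h | h
    · subst h
      simp only [List.filter_cons, hf, List.length_cons]
      exact Nat.lt_succ_of_le (List.length_filter_le f ys)
    · have := ih h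
      simp only [List.filter_cons, List.length_cons]
      split
      · simp only [List.length_cons]; omega
      · omega

theorem pv_pivot_mem (x : Int) (ys : List Int) :
    PySem.List.pyGetD (x :: ys) (PySem.Int.floordiv ((x :: ys).length : Int) 2) 0 ∈ x :: ys := by
  apply PySem.List.pyGetD_mem
  have h : PySem.Int.floordiv (((x :: ys).length : Nat) : Int) 2 = (((x :: ys).length / 2 : Nat) : Int) :=
    PySem.Int.floordiv_natCast _ 2
  rw [h]
  have hlt : (x :: ys).length / 2 < (x :: ys).length :=
    Nat.div_lt_self (by simp) (by omega)
  simp only [PySem.Raise.InRange]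
  push_cast
  omega

-- sum of the k smallest elements of xs, by quickselect-style partitioning (port of _sum_smallest)
def sumSmallest (xs : List Int) (k : Int) : Int :=
  if k = 0 then 0
  else
    match xs with
    | [] => 0  -- Python raises IndexError here; never reached for 0 ≤ k ≤ len(xs)
    | x :: ys =>
      let p := PySem.List.pyGetD (x :: ys) (PySem.Int.floordiv ((x :: ys).length : Int) 2) 0
      let less := (x :: ys).filter (fun y => decide (y < p))
      let greater := (x :: ys).filter (fun y => decide (p < y))
      let n_eq : Int := ((x :: ys).length : Int) - less.length - greater.length
      if k ≤ (less.length : Int) then sumSmallest less k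
      else if k ≤ (less.length : Int) + n_eq then less.sum + p * (k - less.length)
      else less.sum + p * n_eq + sumSmallest greater (k - less.length - n_eq)
termination_by xs.length
decreasing_by
  · exact pv_filter_length_lt _ _ _ (pv_pivot_mem x ys) (by simp)
  · exact pv_filter_length_lt _ _ _ (pv_pivot_mem x ys) (by simp)

def calculate_max_possible_value_alt (arr : List Int) (MOD : Int) : Int :=
  let tp := arr.foldl (fun (acc : Int × Int) e => (acc.1 + e, acc.2 + |e|)) (0, 0)
  let low := sumSmallest arr (PySem.Int.floordiv (arr.length : Int) 2)
  PySem.Int.mod (PySem.Int.mod tp.2 MOD * PySem.Int.mod (tp.1 - 2 * low) MOD) MOD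

-- ===== PRECONDITION & SPEC =====
-- Pre_ excludes exactly MOD = 0, where Python's '%' raises ZeroDivisionError (in both A and B).
def Pre_calculate_max_possible_value (arr : List Int) (MOD : Int) : Prop := MOD ≠ 0
instance (arr : List Int) (MOD : Int) : Decidable (Pre_calculate_max_possible_value arr MOD) := by
  unfold Pre_calculate_max_possible_value; infer_instance

def pvWitness_calculate_max_possible_value : List Int × Int := ([3, -1, 2, 2], 7)

def Spec_calculate_max_possible_value (arr : List Int) (MOD : Int) (out : Int) : Prop := out = calculate_max_possible_value_alt arr MOD
instance (arr : List Int) (MOD : Int) (out : Int) : Decidable (Spec_calculate_max_possible_value arr MOD out) := by unfold Spec_calculate_max_possible_value; infer_instance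

-- ===== CLAIM (what is proved, stated in full; the proofs are below) =====
def Claim_equal_calculate_max_possible_value : Prop := ∀ (arr : List Int) (MOD : Int), Dom_calculate_max_possible_value arr MOD → Pre_calculate_max_possible_value arr MOD → Spec_calculate_max_possible_value arr MOD (calculate_max_possible_value arr MOD)

-- ===== LEMMAS AND PROOFS =====

-- mod-arithmetic: PySem.Int.mod a b is congruent to a, and respects congruence
theorem pv_mod_modEq (a b : Int) : Int.ModEq b (PySem.Int.mod a b) a := by
  have h := PySem.Int.floordiv_mul_add_mod a b
  have : b ∣ a - PySem.Int.mod a b := ⟨PySem.Int.floordiv a b, by linarith⟩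
  exact Int.modEq_iff_dvd.mpr this

theorem pv_mod_congr (a a' b : Int) (hb : b ≠ 0) (h : Int.ModEq b a a') :
    PySem.Int.mod a b = PySem.Int.mod a' b := by
  have h1 : Int.ModEq b (PySem.Int.mod a b) (PySem.Int.mod a' b) :=
    ((pv_mod_modEq a b).trans h).trans (pv_mod_modEq a' b).symm
  have hd : b ∣ PySem.Int.mod a' b - PySem.Int.mod a b := Int.ModEq.dvd h1
  have hd' : |b| ∣ PySem.Int.mod a' b - PySem.Int.mod a b := (abs_dvd _ _).mpr hd
  have hz : PySem.Int.mod a' b - PySem.Int.mod a b = 0 := by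
    apply Int.eq_zero_of_abs_lt_dvd hd'
    rcases lt_or_gt_of_ne hb with hneg | hpos
    · have b1 := PySem.Int.mod_neg_bounds (a := a) hneg
      have b2 := PySem.Int.mod_neg_bounds (a := a') hneg
      rw [abs_of_neg hneg]; rw [abs_lt]; omega
    · have b1l := PySem.Int.mod_nonneg (a := a) hpos
      have b1u := PySem.Int.mod_lt (a := a) hpos
      have b2l := PySem.Int.mod_nonneg (a := a') hpos
      have b2u := PySem.Int.mod_lt (a := a') hpos
      rw [abs_of_pos hpos]; rw [abs_lt]; omega
  omega

-- the stepwise-mod accumulation loop is congruent to the plain sum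
theorem pv_foldl_mod_add (b : Int) (f : Int → Int) :
    ∀ (xs : List Int) (a : Int),
      Int.ModEq b (xs.foldl (fun acc x => PySem.Int.mod (acc + f x) b) a) (a + (xs.map f).sum) := by
  intro xs
  induction xs with
  | nil => intro a; simp [Int.ModEq.refl]
  | cons x t ih =>
    intro a
    simp only [List.foldl_cons, List.map_cons, List.sum_cons]
    have h1 := ih (PySem.Int.mod (a + f x) b)
    have h2 : Int.ModEq b (PySem.Int.mod (a + f x) b + (t.map f).sum) (a + (f x + (t.map f).sum)) := by
      have := Int.ModEq.add_right ((t.map f).sum) (pv_mod_modEq (a + f x) b)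
      calc PySem.Int.mod (a + f x) b + (t.map f).sum
          ≡ (a + f x) + (t.map f).sum [ZMOD b] := this
        _ = a + (f x + (t.map f).sum) := by ring
    exact h1.trans h2
    
-- descending sort is the reverse of the ascending sort (Int, identity key)
theorem pv_desc_eq_reverse_asc (xs : List Int) :
    PySem.List.sorted xs (fun x => x) true = (PySem.List.sorted xs (fun x => x) false).reverse := by
  apply List.Perm.eq_of_pairwise (le := fun a b : Int => b ≤ a)
    (fun a b _ _ h1 h2 => le_antisymm h2 h1)
  · exact PySem.List.sorted_pairwise_rev xs (fun x => x)
  · exact List.pairwise_reverse.mpr (PySem.List.sorted_pairwise xs (fun x => x))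
  · exact ((PySem.List.sorted_perm xs (fun x => x) true).trans
      (PySem.List.sorted_perm xs (fun x => x) false).symm).trans (List.reverse_perm _).symm

-- the ascending sort splits at any pivot p into (< p), (= p), (> p) blocks
theorem pv_sorted_decomp (xs : List Int) (p : Int) :
    PySem.List.sorted xs (fun x => x) false =
      PySem.List.sorted (xs.filter (fun y => decide (y < p))) (fun x => x) false
      ++ (List.replicate (xs.filter (fun y => decide (y = p))).length p
      ++ PySem.List.sorted (xs.filter (fun y => decide (p < y))) (fun x => x) false) := by
  have hmemL : ∀ a, a ∈ PySem.List.sorted (xs.filter (fun y => decide (y < p))) (fun x => x) false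
      → a < p := by
    intro a ha
    exact of_decide_eq_true (List.mem_filter.mp ((PySem.List.mem_sorted _ _ _ _).mp ha)).2
  have hmemG : ∀ b, b ∈ PySem.List.sorted (xs.filter (fun y => decide (p < y))) (fun x => x) false
      → p < b := by
    intro b hb
    exact of_decide_eq_true (List.mem_filter.mp ((PySem.List.mem_sorted _ _ _ _).mp hb)).2
  apply PySem.List.sorted_id_eq_of_perm_of_pairwise
  · -- permutation
    have heq : xs.filter (fun y => decide (y = p)) =
        List.replicate (xs.filter (fun y => decide (y = p))).length p :=
      List.eq_replicate_of_mem (fun b hb => of_decide_eq_true (List.mem_filter.mp hb).2)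
    have h1 := List.filter_append_perm (fun y => decide (y < p)) xs
    have h2 := List.filter_append_perm (fun y => decide (y = p))
      (xs.filter (fun y => !decide (y < p)))
    have e1 : (xs.filter (fun y => !decide (y < p))).filter (fun y => decide (y = p)) =
        xs.filter (fun y => decide (y = p)) := by
      rw [List.filter_filter]
      apply List.filter_congr
      intro y _
      by_cases h : y = p <;> simp [h]
    have e2 : (xs.filter (fun y => !decide (y < p))).filter (fun y => !decide (y = p)) =
        xs.filter (fun y => decide (p < y)) := by
      rw [List.filter_filter]
      apply List.filter_congr
      intro y _
      by_cases h1 : y = p <;> by_cases h2 : y < p <;> simp [h1, h2] <;> omega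
    rw [e1, e2] at h2
    refine List.Perm.trans (List.Perm.trans ?_ (List.Perm.append_left _ h2)) h1
    apply List.Perm.append (PySem.List.sorted_perm _ _ _)
    exact List.Perm.append (heq ▸ List.Perm.refl _) (PySem.List.sorted_perm _ _ _)
  · -- sortedness
    rw [List.pairwise_append]
    refine ⟨PySem.List.sorted_pairwise _ _, ?_, ?_⟩
    · rw [List.pairwise_append]
      refine ⟨List.pairwise_replicate.mpr (Or.inr (le_refl p)),
        PySem.List.sorted_pairwise _ _, ?_⟩
      intro a ha b hb
      have hap : a = p := List.eq_of_mem_replicate ha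
      have hbp : p < b := hmemG b hb
      omega
    · intro a ha b hb
      have hap : a < p := hmemL a ha
      rcases List.mem_append.mp hb with hb | hb
      · have : b = p := List.eq_of_mem_replicate hb
        omega
      · have : p < b := hmemG b hb
        omega

-- quickselect computes the sum of the k smallest elements
theorem pv_sumSmallest_eq : ∀ (N : Nat) (xs : List Int) (k : Int), xs.length ≤ N → 0 ≤ k →
    k ≤ (xs.length : Int) →
    sumSmallest xs k = ((PySem.List.sorted xs (fun x => x) false).take k.toNat).sum := by
  intro N
  induction N with
  | zero =>
    intro xs k h0 hk0 hkn
    have hxs : xs.length = 0 := by omega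
    have hk : k = 0 := by omega
    subst hk
    rw [sumSmallest.eq_def]
    simp
  | succ N ih =>
    intro xs k hN hk0 hkn
    by_cases hk : k = 0
    · subst hk
      rw [sumSmallest.eq_def]
      simp
    · match xs, hN, hkn with
      | [], _, hkn => simp at hkn; omega
      | x :: ys, hN, hkn =>
        rw [sumSmallest.eq_def]
        simp only [if_neg hk]
        set p := PySem.List.pyGetD (x :: ys) (PySem.Int.floordiv ((x :: ys).length : Int) 2) 0
          with hp
        set L := (x :: ys).filter (fun y => decide (y < p)) with hL
        set G := (x :: ys).filter (fun y => decide (p < y)) with hG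
        set E := (x :: ys).filter (fun y => decide (y = p)) with hE
        have hdec := pv_sorted_decomp (x :: ys) p
        rw [← hL, ← hE, ← hG] at hdec
        have hlen : L.length + (E.length + G.length) = (x :: ys).length := by
          have := congrArg List.length hdec
          simp only [List.length_append, PySem.List.length_sorted, List.length_replicate] at this
          omega
        have hpm : p ∈ x :: ys := by rw [hp]; exact pv_pivot_mem x ys
        have hLlt : L.length < (x :: ys).length :=
          pv_filter_length_lt _ _ p hpm (decide_eq_false (lt_irrefl p))
        have hGlt : G.length < (x :: ys).length :=
          pv_filter_length_lt _ _ p hpm (decide_eq_false (lt_irrefl p))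
        rw [hdec]
        by_cases c1 : k ≤ (L.length : Int)
        · rw [if_pos c1]
          rw [List.take_append_of_le_length (by rw [PySem.List.length_sorted]; omega)]
          exact ih L k (by omega) hk0 c1
        · rw [if_neg c1]
          have hkt : L.length ≤ k.toNat := by omega
          rw [List.take_append, List.take_of_length_le (by rw [PySem.List.length_sorted]; omega),
            List.take_append]
          rw [PySem.List.length_sorted]
          by_cases c2 : k ≤ (L.length : Int) + (((x :: ys).length : Int) - L.length - G.length)
          · rw [if_pos c2]
            have hje : k.toNat - L.length ≤ E.length := by omega
            rw [List.take_replicate, List.length_replicate,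
              Nat.sub_eq_zero_of_le hje, List.take_zero]
            have hmin : min (k.toNat - L.length) E.length = k.toNat - L.length := by omega
            rw [hmin]
            rw [List.append_nil, List.sum_append, List.sum_replicate,
              (PySem.List.sorted_perm L (fun x => x) false).sum_eq]
            have : ((k.toNat - L.length : Nat) : Int) = k - L.length := by omega
            rw [nsmul_eq_mul]
            rw [this]
            ring
          · rw [if_neg c2]
            have hje : E.length ≤ k.toNat - L.length := by omega
            rw [List.take_replicate, List.length_replicate]
            have hmin : min (k.toNat - L.length) E.length = E.length := by omega
            rw [hmin]
            rw [List.sum_append, List.sum_append, List.sum_replicate,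
              (PySem.List.sorted_perm L (fun x => x) false).sum_eq]
            have harg : (k - (L.length : Int) - (((x :: ys).length : Int) - L.length - G.length)).toNat
                = k.toNat - L.length - E.length := by omega
            have := ih G (k - L.length - (((x :: ys).length : Int) - L.length - G.length))
              (by omega) (by omega) (by omega)
            rw [harg] at this
            rw [← this]
            rw [nsmul_eq_mul]
            have hE2 : ((E.length : Nat) : Int) = ((x :: ys).length : Int) - L.length - G.length := by
              omega
            rw [hE2]
            ring
-- B's accumulation loop computes the total sum and the total absolute sum
theorem pv_foldl_pair (arr : List Int) : ∀ ab : Int × Int,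
    arr.foldl (fun acc e => (acc.1 + e, acc.2 + |e|)) ab
      = (ab.1 + arr.sum, ab.2 + (arr.map (fun e => |e|)).sum) := by
  induction arr with
  | nil => intro ab; simp
  | cons x t ih =>
    intro ab
    simp only [List.foldl_cons, ih, List.sum_cons, List.map_cons]
    rw [Prod.mk.injEq]
    constructor <;> ring

-- the common closed form both ports are congruent to
theorem pv_B_eq (arr : List Int) (M : Int) (hM : M ≠ 0) :
    calculate_max_possible_value_alt arr M =
      PySem.Int.mod ((arr.map (fun e => |e|)).sum *
        (arr.sum - 2 * ((PySem.List.sorted arr (fun x => x) false).take (arr.length / 2)).sum)) M := by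
  simp only [calculate_max_possible_value_alt, pv_foldl_pair]
  have hfd : PySem.Int.floordiv ((arr.length : Nat) : Int) 2 = ((arr.length / 2 : Nat) : Int) := by
    exact_mod_cast PySem.Int.floordiv_natCast arr.length 2
  rw [hfd, pv_sumSmallest_eq arr.length arr _ le_rfl (by positivity)
    (by exact_mod_cast Nat.cast_le.mpr (Nat.div_le_self _ _)), Int.toNat_natCast]
  apply pv_mod_congr _ _ _ hM
  have h := Int.ModEq.mul (pv_mod_modEq ((arr.map (fun e => |e|)).sum) M)
    (pv_mod_modEq (arr.sum - 2 * ((PySem.List.sorted arr (fun x => x) false).take (arr.length / 2)).sum) M)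
  simpa using h

theorem pv_A_eq (arr : List Int) (M : Int) (hM : M ≠ 0) :
    calculate_max_possible_value arr M =
      PySem.Int.mod ((arr.map (fun e => |e|)).sum *
        (arr.sum - 2 * ((PySem.List.sorted arr (fun x => x) false).take (arr.length / 2)).sum)) M := by
  simp only [calculate_max_possible_value]
  set asc := PySem.List.sorted arr (fun x => x) false with hasc
  have hs : PySem.List.sorted arr (fun x => x) true = asc.reverse := pv_desc_eq_reverse_asc arr
  rw [hs]
  set s := asc.reverse with hsrev
  have hlen : s.length = arr.length := by
    rw [hsrev, List.length_reverse, hasc, PySem.List.length_sorted]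
  have hlasc : asc.length = arr.length := by rw [hasc, PySem.List.length_sorted]
  set n := arr.length with hn
  have hfd : PySem.Int.floordiv ((s.length : Nat) : Int) 2 = ((n / 2 : Nat) : Int) := by
    rw [hlen]; exact_mod_cast PySem.Int.floordiv_natCast n 2
  have hm2 : PySem.Int.mod ((s.length : Nat) : Int) 2 = ((n % 2 : Nat) : Int) := by
    rw [hlen]; exact_mod_cast PySem.Int.mod_natCast n 2
  rw [hfd, hm2]
  set m := n / 2 with hm
  -- loop 1: sum over the first half
  have hloop1 : ((PySem.List.pyRange 0 ((m : Nat) : Int)).foldl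
      (fun summ i => PySem.Int.mod (summ + PySem.List.pyGetD s i 0) M) 0)
      = (s.take m).foldl (fun acc x => PySem.Int.mod (acc + x) M) 0 := by
    have hml : (s.take m).length = m := by
      rw [List.length_take]; omega
    have hcongr : ∀ (acc : Int), ∀ i ∈ PySem.List.pyRange 0 ((m : Nat) : Int),
        PySem.Int.mod (acc + PySem.List.pyGetD s i 0) M
          = PySem.Int.mod (acc + PySem.List.pyGetD (s.take m) i 0) M := by
      intro acc i hi
      rcases PySem.List.mem_pyRange_one.mp hi with ⟨h0, h1⟩
      rw [PySem.List.pyGetD_eq_getElem s 0 h0 (by omega),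
        PySem.List.pyGetD_eq_getElem (s.take m) 0 h0 (by rw [hml]; omega)]
      rw [List.getElem_take]
    rw [PySem.List.foldl_congr_mem _ _ _ _ hcongr]
    have := PySem.List.foldl_pyRange_zero_pyGetD' (s.take m) 0
      (fun acc x => PySem.Int.mod (acc + x) M) 0
    rw [hml] at this
    exact this
  -- loop 2: subtract the second half
  have hloop2 : ∀ init : Int, ((PySem.List.pyRange ((m : Nat) : Int) ((s.length : Nat) : Int)).foldl
      (fun summ i => PySem.Int.mod (summ - PySem.List.pyGetD s i 0) M) init)
      = (s.drop m).foldl (fun acc x => PySem.Int.mod (acc - x) M) init := by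
    intro init
    have := PySem.List.foldl_pyRange_pyGetD' s 0
      (fun acc x => PySem.Int.mod (acc - x) M) init (a := ((m : Nat) : Int)) (by positivity)
    rw [Int.toNat_natCast] at this
    exact this
  rw [hloop1, hloop2]
  -- congruences
  have habs : Int.ModEq M (s.foldl (fun acc e => PySem.Int.mod (acc + |e|) M) 0)
      ((arr.map (fun e => |e|)).sum) := by
    have h := pv_foldl_mod_add M (fun e => |e|) s 0
    have hperm : (s.map (fun e => |e|)).sum = (arr.map (fun e => |e|)).sum := by
      apply List.Perm.sum_eq
      apply List.Perm.map
      exact (List.reverse_perm asc).trans (PySem.List.sorted_perm arr (fun x => x) false)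
    rw [hperm] at h
    simpa using h
  have hsub : ∀ init, Int.ModEq M ((s.drop m).foldl (fun acc x => PySem.Int.mod (acc - x) M) init)
      (init - (s.drop m).sum) := by
    intro init
    have hfn : (fun (acc x : Int) => PySem.Int.mod (acc - x) M)
        = (fun acc x => PySem.Int.mod (acc + (fun y : Int => -y) x) M) := by
      funext acc x
      rw [sub_eq_add_neg]
    rw [hfn]
    have h := pv_foldl_mod_add M (fun y : Int => -y) (s.drop m) init
    rw [← List.sum_neg] at h
    simpa [sub_eq_add_neg] using h
  have hadd : Int.ModEq M ((s.take m).foldl (fun acc x => PySem.Int.mod (acc + x) M) 0)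
      ((s.take m).sum) := by
    have h := pv_foldl_mod_add M (fun y : Int => y) (s.take m) 0
    simpa [List.map_id'] using h
  -- the half-sums in terms of the ascending sort
  have hdropsum : (s.drop m).sum = (asc.take (n - m)).sum := by
    rw [hsrev, List.drop_reverse, hlasc, List.sum_reverse]
  have htotal : (s.take m).sum + (s.drop m).sum = arr.sum := by
    rw [List.sum_take_add_sum_drop]
    exact List.Perm.sum_eq ((List.reverse_perm asc).trans (PySem.List.sorted_perm arr (fun x => x) false))
  -- combine, by parity
  apply pv_mod_congr _ _ _ hM
  by_cases hpar : n % 2 = 0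
  · -- even length
    rw [if_neg (by rw [hpar]; exact (by norm_num : ¬ ((0 : Nat) : Int) ≠ 0))]
    apply Int.ModEq.mul habs
    have h2 := (hsub ((s.take m).foldl (fun acc x => PySem.Int.mod (acc + x) M) 0)).trans
      (Int.ModEq.sub_right ((s.drop m).sum) hadd)
    apply h2.trans
    have hnm : n - m = m := by omega
    rw [hnm] at hdropsum
    have heq : (s.take m).sum - (s.drop m).sum = arr.sum - 2 * (asc.take m).sum := by omega
    rw [heq]
  · -- odd length
    have hpar1 : n % 2 = 1 := by omega
    rw [if_pos (by rw [hpar1]; norm_num)]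
    apply Int.ModEq.mul habs
    have hmlt : m < n := by omega
    have hmid : PySem.List.pyGetD s ((m : Nat) : Int) 0 = asc[m]'(by omega) := by
      rw [PySem.List.pyGetD_natCast, List.getD_eq_getElem s 0 (by omega)]
      simp only [hsrev]
      rw [List.getElem_reverse]
      congr 1
      omega
    set w := PySem.List.pyGetD s ((m : Nat) : Int) 0 with hw
    set v := (s.drop m).foldl (fun acc x => PySem.Int.mod (acc - x) M)
      ((s.take m).foldl (fun acc x => PySem.Int.mod (acc + x) M) 0) with hv
    have h2 : Int.ModEq M v ((s.take m).sum - (s.drop m).sum) :=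
      (hsub _).trans (Int.ModEq.sub_right ((s.drop m).sum) hadd)
    have hstep1 : Int.ModEq M (PySem.Int.mod (v + w) M) (v + w) := pv_mod_modEq _ M
    have hchain : Int.ModEq M (PySem.Int.mod (PySem.Int.mod (v + w) M + w) M) (v + 2 * w) := by
      have h4 := (pv_mod_modEq (PySem.Int.mod (v + w) M + w) M).trans
        (Int.ModEq.add_right w hstep1)
      apply h4.trans
      have he : v + w + w = v + 2 * w := by ring
      rw [he]
    apply hchain.trans
    have h3 : Int.ModEq M (v + 2 * w) ((s.take m).sum - (s.drop m).sum + 2 * w) :=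
      Int.ModEq.add_right _ h2
    apply h3.trans
    have hnm : n - m = m + 1 := by omega
    rw [hnm] at hdropsum
    have hts : (asc.take (m + 1)).sum = (asc.take m).sum + asc[m]'(by omega) :=
      List.sum_take_succ asc m (by omega)
    have heq : (s.take m).sum - (s.drop m).sum + 2 * w = arr.sum - 2 * (asc.take m).sum := by
      rw [hmid]
      omega
    rw [heq]

theorem calculate_max_possible_value_spec : Claim_equal_calculate_max_possible_value := by
  intro arr MOD _ hpre
  unfold Spec_calculate_max_possible_value
  rw [pv_A_eq arr MOD hpre, pv_B_eq arr MOD hpre]
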